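-- pv_equiv track=rewrite | github.com/BioMolecularPhysicsGroup-UNCC/MachineLearning | NN_gene_prediction/Generate_sensor_data.py | Stop_codon_sensor_left
-- ===== SOURCE A (Python) =====
-- def Stop_codon_sensor_left(seq):
--     midpoint = int((len(seq) - 1)/2) # center of window
--     d = 0
--     for i in range(0,midpoint):
--         d0 = seq[i:i+3]
--         if d0.upper() == "TAA" or d0.upper() == "TAG" or d0.upper() == "TGA":
--             if (midpoint-abs(midpoint-i)) > d:
--                 d = midpoint-abs(midpoint-i)
--     return d
-- ===== SOURCE B (Python) =====
-- def Stop_codon_sensor_left(seq):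
--     midpoint = int((len(seq) - 1)/2)
--     for i in range(midpoint - 1, -1, -1):
--         if seq[i:i+3].upper() in {"TAA", "TAG", "TGA"}:
--             return i
--     return 0
-- ===== Notes on version B (the rewrite author's own statement) =====
-- stated objective: simpler
-- what changed: Replaces the forward loop with a running-maximum accumulator and the midpoint-abs arithmetic by a reverse scan from midpoint-1 that returns the first (i.e. last) stop-codon index immediately, 0 if none.
import Mathlib
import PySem

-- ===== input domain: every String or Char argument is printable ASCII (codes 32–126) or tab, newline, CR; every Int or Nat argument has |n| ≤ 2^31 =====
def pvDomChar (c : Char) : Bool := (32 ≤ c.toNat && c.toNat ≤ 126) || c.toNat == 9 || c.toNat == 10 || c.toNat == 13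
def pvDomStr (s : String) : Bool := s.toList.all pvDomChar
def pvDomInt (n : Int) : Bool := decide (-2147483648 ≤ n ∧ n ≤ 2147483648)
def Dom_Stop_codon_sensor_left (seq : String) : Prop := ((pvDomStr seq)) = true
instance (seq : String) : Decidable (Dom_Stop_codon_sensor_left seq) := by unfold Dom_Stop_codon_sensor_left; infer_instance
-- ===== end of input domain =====

-- B replaces A's forward loop with running-maximum accumulator and midpoint-abs arithmetic
-- by a reverse scan from midpoint-1 that returns the first match directly (simpler).


-- ===== PORT A =====
-- midpoint = int((len(seq)-1)/2): Python truncates toward 0; for len = 0 that is int(-0.5) = 0,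
-- for len ≥ 1 it is (len-1)//2, so Nat (len-1)/2 (saturating subtraction) is exact.
def Stop_codon_sensor_left (seq : String) : Int :=
  let s := seq.toList
  let midpoint : Int := ((s.length - 1) / 2 : Nat)
  (PySem.List.pyRange 0 midpoint 1).foldl (fun d i =>
    let d0 := PySem.Chars.upper (PySem.List.slice s (some i) (some (i + 3)))
    if d0 = "TAA".toList ∨ d0 = "TAG".toList ∨ d0 = "TGA".toList then
      if midpoint - |midpoint - i| > d then midpoint - |midpoint - i| else d
    else d) 0

-- ===== PORT B =====
-- the loop 'for i in range(midpoint-1, -1, -1): if …: return i' as structural recursion on the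
-- counter: state j+1 tests index j and returns it on a match, state 0 is loop exhaustion (return 0)
def Stop_codon_sensor_left_altGo (s : List Char) : Nat → Int
  | 0 => 0
  | j + 1 =>
    let d0 := PySem.Chars.upper (PySem.List.slice s (some (j : Int)) (some ((j : Int) + 3)))
    if d0 = "TAA".toList ∨ d0 = "TAG".toList ∨ d0 = "TGA".toList then (j : Int)
    else Stop_codon_sensor_left_altGo s j

def Stop_codon_sensor_left_alt (seq : String) : Int :=
  Stop_codon_sensor_left_altGo seq.toList ((seq.toList.length - 1) / 2)

-- ===== PRECONDITION & SPEC =====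
def Spec_Stop_codon_sensor_left (seq : String) (out : Int) : Prop := out = Stop_codon_sensor_left_alt seq
instance (seq : String) (out : Int) : Decidable (Spec_Stop_codon_sensor_left seq out) := by unfold Spec_Stop_codon_sensor_left; infer_instance

-- ===== CLAIM (what is proved, stated in full; the proofs are below) =====
def Claim_equal_Stop_codon_sensor_left : Prop := ∀ (seq : String), Dom_Stop_codon_sensor_left seq → Spec_Stop_codon_sensor_left seq (Stop_codon_sensor_left seq)

-- ===== LEMMAS AND PROOFS =====

-- B's reverse scan returns 0 or an index strictly below its counter
lemma altGo_bounds (s : List Char) (n : Nat) :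
    0 ≤ Stop_codon_sensor_left_altGo s n ∧
      (Stop_codon_sensor_left_altGo s n = 0 ∨ Stop_codon_sensor_left_altGo s n < (n : Int)) := by
  induction n with
  | zero => simp [Stop_codon_sensor_left_altGo]
  | succ j ih =>
    simp only [Stop_codon_sensor_left_altGo]
    split_ifs
    · constructor
      · exact_mod_cast Nat.zero_le j
      · right; push_cast; omega
    · rcases ih with ⟨h0, h1 | h1⟩
      · exact ⟨h0, Or.inl h1⟩
      · exact ⟨h0, Or.inr (by push_cast; omega)⟩

-- A's fold over range(0,n) (with fixed midpoint M ≥ n) equals B's reverse scan from n-1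
lemma fold_eq_altGo (s : List Char) (M : Int) (n : Nat) (hn : (n : Int) ≤ M) :
    (PySem.List.pyRange 0 (n : Int) 1).foldl (fun d i =>
        let d0 := PySem.Chars.upper (PySem.List.slice s (some i) (some (i + 3)))
        if d0 = "TAA".toList ∨ d0 = "TAG".toList ∨ d0 = "TGA".toList then
          if M - |M - i| > d then M - |M - i| else d
        else d) 0 = Stop_codon_sensor_left_altGo s n := by
  induction n with
  | zero => simp [PySem.List.pyRange_one_eq_nil, Stop_codon_sensor_left_altGo]
  | succ j ih =>
    have hsplit : PySem.List.pyRange 0 ((j : Nat) + 1 : Int) 1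
        = PySem.List.pyRange 0 (j : Int) 1 ++ [(j : Int)] :=
      PySem.List.pyRange_one_succ_right (by exact_mod_cast Nat.zero_le j)
    have hj : ((j : Nat) + 1 : Int) ≤ M := by exact_mod_cast hn
    have hcast : (((j + 1 : Nat)) : Int) = ((j : Nat) : Int) + 1 := by push_cast; ring
    rw [hcast, hsplit, List.foldl_append]
    rw [ih (by omega)]
    have habs : M - |M - (j : Int)| = (j : Int) := by
      have : |M - (j : Int)| = M - (j : Int) := abs_of_nonneg (by omega)
      omega
    rcases altGo_bounds s j with ⟨h0, hb⟩
    simp only [List.foldl_cons, List.foldl_nil, Stop_codon_sensor_left_altGo, habs]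
    split_ifs with hP hgt
    · rfl
    · -- match at j but j ≤ accumulator: only possible when j = 0 and accumulator = 0
      rcases hb with hb | hb <;> omega
    · rfl

-- ===== VERDICT (by name: the statement is the Claim_ definition above) =====
theorem Stop_codon_sensor_left_spec : Claim_equal_Stop_codon_sensor_left := by
  intro seq _hdom
  unfold Spec_Stop_codon_sensor_left Stop_codon_sensor_left Stop_codon_sensor_left_alt
  exact fold_eq_altGo seq.toList _ _ le_rfl
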